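-- pv_equiv track=rewrite | github.com/rujuj/advent-of-code-2021 | day-4-giant-squid/day-4-p2.py | boardWinner
-- ===== SOURCE A (Python) =====
-- def boardWinner (board):
--     columns = [0] * (len(board[0]))
--     for row in board:
--         if all (x == 'x' for x in row):
--             return True
--         for i, num in enumerate(row):
--             if num == 'x':
--                 columns[i] += 1
--     for column in columns:
--         if column == 5:
--             return True
--     return False
-- ===== SOURCE B (Python) =====
-- def boardWinner(board):
--     width = len(board[0])
--     if any(all(x == 'x' for x in row) for row in board):
--         return True
--     for i in range(width):
--         if sum(1 for row in board if i < len(row) and row[i] == 'x') == 5: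
--             return True
--     return False
-- ===== Notes on version B (the rewrite author's own statement) =====
-- stated objective: alternative
-- what changed: Replaces A's single pass that builds a per-column hit-count table (with early return on a full row) by a row check via any/all followed by a separate per-column rescan counting 'x' cells; no column table is maintained.
-- outside the precondition, e.g. on boardWinner([['a', 'b'], ['x', 'y', 'z']]): A returns False, B returns False
import Mathlib
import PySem

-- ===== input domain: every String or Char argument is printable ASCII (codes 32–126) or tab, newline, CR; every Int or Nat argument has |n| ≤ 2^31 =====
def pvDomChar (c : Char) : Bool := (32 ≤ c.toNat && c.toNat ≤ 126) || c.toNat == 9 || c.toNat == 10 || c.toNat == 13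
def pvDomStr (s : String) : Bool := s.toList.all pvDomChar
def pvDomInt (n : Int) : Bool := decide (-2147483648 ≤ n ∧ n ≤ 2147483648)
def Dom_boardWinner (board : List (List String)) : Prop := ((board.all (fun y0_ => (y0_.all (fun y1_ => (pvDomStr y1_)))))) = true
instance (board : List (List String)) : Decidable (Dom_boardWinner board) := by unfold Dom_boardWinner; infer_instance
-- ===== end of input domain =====

-- B replaces A's single-pass per-column count table by a row check (any/all) plus a separate
-- per-column rescan counting 'x' cells; same asymptotic cost, different traversal (objective: alternative).
-- ===== PORT A =====
-- A: builds a per-column count table in one pass over rows, returning early on a full row,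
-- then scans the table for a count of 5.

-- inner loop `for i, num in enumerate(row): if num == 'x': columns[i] += 1`
def bwIncr : List Int → List String → Nat → List Int
  | cols, [], _ => cols
  | cols, num :: rest, i =>
      bwIncr (if num == "x" then cols.set i (cols.getD i 0 + 1) else cols) rest (i + 1)

-- outer loop over rows, then the final scan `for column in columns: if column == 5: return True`
def bwMain : List (List String) → List Int → Bool
  | [], cols => cols.any (fun c => c == 5)
  | row :: rest, cols =>
    if row.all (fun x => x == "x") then true
    else bwMain rest (bwIncr cols row 0)

def boardWinner (board : List (List String)) : Bool :=
  bwMain board (List.replicate (board.headD []).length 0)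

-- ===== PORT B =====
-- B: row check with any/all, then a separate rescan per column index counting 'x' cells.

def bwColCount (board : List (List String)) (i : Nat) : Int :=
  board.foldl (fun acc row => if i < row.length && row.getD i "" == "x" then acc + 1 else acc) 0

def boardWinner_alt (board : List (List String)) : Bool :=
  let width := (board.headD []).length
  if board.any (fun row => row.all (fun x => x == "x")) then true
  else (List.range width).any (fun i => bwColCount board i == 5)

-- ===== PRECONDITION & SPEC =====
-- Pre_ excludes empty boards and ragged boards with a row longer than the first row: there A
-- raises IndexError (columns[i] += 1 past the table) whenever such a row has an 'x' beyond the
-- first row's width; the remaining such ragged boards, on which A happens to return, are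
-- excluded with it (both programs return the same value on the cited one).
def Pre_boardWinner (board : List (List String)) : Prop :=
  board ≠ [] ∧ ∀ row ∈ board, row.length ≤ (board.headD []).length
instance (board : List (List String)) : Decidable (Pre_boardWinner board) := by
  unfold Pre_boardWinner; infer_instance

def pvWitness_boardWinner : List (List String) :=
  [["x", "y"], ["x", "x"]]

def Spec_boardWinner (board : List (List String)) (out : Bool) : Prop := out = boardWinner_alt board
instance (board : List (List String)) (out : Bool) : Decidable (Spec_boardWinner board out) := by unfold Spec_boardWinner; infer_instance

-- ===== CLAIM (what is proved, stated in full; the proofs are below) =====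
def Claim_equal_boardWinner : Prop := ∀ (board : List (List String)), Dom_boardWinner board → Pre_boardWinner board → Spec_boardWinner board (boardWinner board)

-- ===== LEMMAS AND PROOFS =====

theorem bwIncr_length (row : List String) (cols : List Int) (s : Nat) :
    (bwIncr cols row s).length = cols.length := by
  induction row generalizing cols s with
  | nil => simp [bwIncr]
  | cons num rest ih =>
      simp only [bwIncr]
      rw [ih]
      split <;> simp

theorem bwIncr_getD (row : List String) (cols : List Int) (s j : Nat)
    (hlen : s + row.length ≤ cols.length) :
    (bwIncr cols row s).getD j 0 =
      cols.getD j 0 +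
        (if s ≤ j ∧ j - s < row.length ∧ row.getD (j - s) "" == "x" then 1 else 0) := by
  induction row generalizing cols s with
  | nil => simp [bwIncr]
  | cons num rest ih =>
      simp only [bwIncr]
      have hlen' : s + 1 + rest.length ≤ cols.length := by simp at hlen; omega
      rw [ih _ (s + 1) (by split
                           · simpa [List.length_set] using hlen'
                           · exact hlen')]
      have hcols : ∀ c : List Int, c = (if num == "x" then cols.set s (cols.getD s 0 + 1) else cols) →
          c.getD j 0 + (if s + 1 ≤ j ∧ j - (s + 1) < rest.length ∧ rest.getD (j - (s + 1)) "" == "x" then 1 else 0)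
          = cols.getD j 0 + (if s ≤ j ∧ j - s < (num :: rest).length ∧ (num :: rest).getD (j - s) "" == "x" then 1 else 0) := by
        intro c hc
        by_cases hj : j = s
        · have hs : s < cols.length := by simp at hlen; omega
          have h1 : ¬ (s + 1 ≤ j) := by omega
          by_cases hx : num == "x"
          · rw [hc]
            simp only [hx, if_true, hj]
            rw [List.getD_eq_getElem?_getD, List.getElem?_set_self (by omega)]
            simp [hx, List.getD_eq_getElem?_getD]
          · rw [hc]; simp [hx, hj]
        · have hget : c.getD j 0 = cols.getD j 0 := by
            rw [hc]; split
            · rw [List.getD_eq_getElem?_getD, List.getElem?_set_ne (by omega),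
                ← List.getD_eq_getElem?_getD]
            · rfl
          rw [hget]
          by_cases hsj : s ≤ j
          · have hsj' : s + 1 ≤ j := by omega
            have he : j - s = (j - (s + 1)) + 1 := by omega
            simp [hsj, hsj', he]
          · have h1 : ¬ (s + 1 ≤ j) := by omega
            simp [hsj, h1]
      exact hcols _ rfl

def bwFinal (rows : List (List String)) (cols : List Int) : List Int :=
  rows.foldl (fun c r => bwIncr c r 0) cols

theorem bwFinal_length (rows : List (List String)) (cols : List Int) :
    (bwFinal rows cols).length = cols.length := by
  induction rows generalizing cols with
  | nil => simp [bwFinal]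
  | cons r rest ih => simp [bwFinal, List.foldl_cons] at ih ⊢; rw [ih, bwIncr_length]

theorem bwColCount_eq_countP (board : List (List String)) (i : Nat) :
    bwColCount board i =
      (board.countP (fun row => decide (i < row.length) && row.getD i "" == "x") : Int) := by
  have h := PySem.List.foldl_if_add_one
    (fun row => decide (i < row.length) && row.getD i "" == "x") board (0 : Int)
  simp only [bwColCount]
  rw [h]; ring

theorem bwColCount_cons (r : List String) (rest : List (List String)) (i : Nat) :
    bwColCount (r :: rest) i =
      (if i < r.length && r.getD i "" == "x" then 1 else 0) + bwColCount rest i := by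
  rw [bwColCount_eq_countP, bwColCount_eq_countP, List.countP_cons]
  push_cast
  split <;> ring

theorem bwFinal_getD (rows : List (List String)) (cols : List Int) (i : Nat)
    (hrows : ∀ r ∈ rows, r.length ≤ cols.length) :
    (bwFinal rows cols).getD i 0 = cols.getD i 0 + bwColCount rows i := by
  induction rows generalizing cols with
  | nil => simp [bwFinal, bwColCount]
  | cons r rest ih =>
      simp only [bwFinal, List.foldl_cons] at ih ⊢
      rw [ih _ (by intro q hq; rw [bwIncr_length]; exact hrows q (by simp [hq])),
        bwIncr_getD _ _ _ _ (by have := hrows r (by simp); omega), bwColCount_cons]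
      simp only [Nat.zero_le, true_and, Nat.sub_zero]
      by_cases h1 : i < r.length
      · by_cases h2 : r.getD i "" = "x"
        · simp [h1]; ring
        · simp [h1]; ring
      · simp [h1]

theorem bwMain_eq (rows : List (List String)) (cols : List Int)
    (hrows : ∀ r ∈ rows, r.length ≤ cols.length) :
    bwMain rows cols =
      (rows.any (fun row => row.all (fun x => x == "x")) ||
        (bwFinal rows cols).any (fun c => c == 5)) := by
  induction rows generalizing cols with
  | nil => simp [bwMain, bwFinal]
  | cons r rest ih =>
      simp only [bwMain, List.any_cons]
      by_cases hr : r.all (fun x => x == "x")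
      · simp [hr]
      · rw [if_neg (by simpa using hr)]
        rw [ih _ (by intro q hq; rw [bwIncr_length]; exact hrows q (by simp [hq]))]
        simp [hr, bwFinal]

theorem any_congr_mem (l : List Nat) (p q : Nat → Bool) (h : ∀ x ∈ l, p x = q x) :
    l.any p = l.any q := by
  induction l with
  | nil => rfl
  | cons x xs ih =>
      simp only [List.any_cons, h x (by simp), ih (fun y hy => h y (by simp [hy]))]

theorem any_eq_range_getD (l : List Int) (p : Int → Bool) :
    l.any p = (List.range l.length).any (fun i => p (l.getD i 0)) := by
  rw [Bool.eq_iff_iff]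
  simp only [List.any_eq_true, List.mem_range]
  constructor
  · rintro ⟨x, hx, hp⟩
    obtain ⟨i, hi, rfl⟩ := List.mem_iff_getElem.mp hx
    refine ⟨i, hi, ?_⟩
    simpa [List.getD_eq_getElem?_getD, List.getElem?_eq_getElem hi] using hp
  · rintro ⟨i, hi, hp⟩
    refine ⟨l.getD i 0, ?_, hp⟩
    simp only [List.getD_eq_getElem?_getD, List.getElem?_eq_getElem hi, Option.getD_some]
    exact List.getElem_mem hi

-- ===== VERDICT (by name: the statement is the Claim_ definition above) =====
theorem boardWinner_spec : Claim_equal_boardWinner := by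
  intro board _ hpre
  obtain ⟨hne, hrows⟩ := hpre
  unfold Spec_boardWinner boardWinner boardWinner_alt
  set w := (board.headD []).length with hw
  have hrows' : ∀ r ∈ board, r.length ≤ (List.replicate w (0 : Int)).length := by
    intro r hr; rw [List.length_replicate]; exact hrows r hr
  rw [bwMain_eq _ _ hrows']
  by_cases hany : board.any (fun row => row.all (fun x => x == "x"))
  · simp [hany]
  · rw [if_neg (by simp [hany])]
    simp only [hany, Bool.false_or]
    rw [any_eq_range_getD, bwFinal_length, List.length_replicate]
    refine any_congr_mem _ _ _ (fun i hi => ?_)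
    simp only [List.mem_range] at hi
    rw [bwFinal_getD _ _ _ hrows']
    simp [hi]
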